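-- pv_equiv track=rewrite | github.com/Lui105/VINF_crawler | indexer.py | find_regular_per_game_table
-- ===== SOURCE A (Python) =====
-- from typing import Dict, List, Iterable, Tuple, Optional
--
-- def find_regular_per_game_table(tables: List[Dict]) -> Optional[Dict]:
--     for t in tables:
--         h = (t.get("headline") or "").strip().lower()
--         if h.startswith("per game table") and "playoff" not in h:
--             return t
--     for t in tables:
--         h = (t.get("headline") or "").strip().lower()
--         if "per game" in h:
--             return t
--     return None
-- ===== SOURCE B (Python) =====
-- from typing import Dict, List, Optional
--
-- def find_regular_per_game_table(tables: List[Dict]) -> Optional[Dict]: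
--     fallback = None
--     for t in tables:
--         h = (t.get("headline") or "").strip().lower()
--         if h.startswith("per game table") and "playoff" not in h:
--             return t
--         if fallback is None and "per game" in h:
--             fallback = t
--     return fallback
-- ===== Notes on version B (the rewrite author's own statement) =====
-- stated objective: simpler
-- what changed: Replaces A's two full passes (strong scan, then weak rescan from the start) with one pass that returns strong matches eagerly and records the first weak match in a fallback variable.
import Mathlib
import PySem

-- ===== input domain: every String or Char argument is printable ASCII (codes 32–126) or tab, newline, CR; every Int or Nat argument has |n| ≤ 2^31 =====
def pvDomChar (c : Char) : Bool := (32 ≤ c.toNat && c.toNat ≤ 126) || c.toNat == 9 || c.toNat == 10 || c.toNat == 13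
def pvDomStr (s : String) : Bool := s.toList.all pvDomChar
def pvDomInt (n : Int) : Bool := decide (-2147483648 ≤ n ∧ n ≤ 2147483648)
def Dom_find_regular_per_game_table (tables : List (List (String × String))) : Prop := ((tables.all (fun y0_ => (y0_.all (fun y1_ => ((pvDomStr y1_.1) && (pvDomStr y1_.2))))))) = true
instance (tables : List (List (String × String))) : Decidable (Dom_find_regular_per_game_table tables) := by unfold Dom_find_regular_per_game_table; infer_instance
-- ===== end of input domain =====

-- B replaces A's two full passes with one pass keeping a fallback candidate (simpler; same result).


-- ===== PORT A =====
-- h = (t.get("headline") or "").strip().lower()  (missing key and "" both normalize to "")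
def pvNormHeadline (t : List (String × String)) : String :=
  PySem.Str.lower (PySem.Str.strip (((PySem.Dict.mk t).get? "headline").getD ""))

-- h.startswith("per game table") and "playoff" not in h
def pvStrong (h : String) : Bool :=
  PySem.Str.startswith h "per game table" && !(PySem.Str.isIn "playoff" h)

-- "per game" in h
def pvWeak (h : String) : Bool := PySem.Str.isIn "per game" h

-- first loop of A: first table whose headline starts with "per game table" and lacks "playoff"
def pvScanStrong : List (List (String × String)) → Option (List (String × String))
  | [] => none
  | t :: rest =>
      if pvStrong (pvNormHeadline t) then some t
      else pvScanStrong rest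

-- second loop of A: first table whose headline contains "per game"
def pvScanWeak : List (List (String × String)) → Option (List (String × String))
  | [] => none
  | t :: rest =>
      if pvWeak (pvNormHeadline t) then some t
      else pvScanWeak rest

def find_regular_per_game_table (tables : List (List (String × String))) : Option (List (String × String)) :=
  match pvScanStrong tables with
  | some t => some t
  | none => pvScanWeak tables

-- ===== PORT B =====
-- single pass: return a strong match eagerly, remember the first weak match as fallback
def pvGoAlt : List (List (String × String)) → Option (List (String × String)) → Option (List (String × String))
  | [], fallback => fallback
  | t :: rest, fallback =>
      if pvStrong (pvNormHeadline t) then some t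
      else pvGoAlt rest (if fallback.isNone && pvWeak (pvNormHeadline t) then some t else fallback)

def find_regular_per_game_table_alt (tables : List (List (String × String))) : Option (List (String × String)) :=
  pvGoAlt tables none

-- ===== PRECONDITION & SPEC =====
def Spec_find_regular_per_game_table (tables : List (List (String × String))) (out : Option (List (String × String))) : Prop := out = find_regular_per_game_table_alt tables
instance (tables : List (List (String × String))) (out : Option (List (String × String))) : Decidable (Spec_find_regular_per_game_table tables out) := by unfold Spec_find_regular_per_game_table; infer_instance

-- ===== CLAIM (what is proved, stated in full; the proofs are below) =====
def Claim_equal_find_regular_per_game_table : Prop := ∀ (tables : List (List (String × String))), Dom_find_regular_per_game_table tables → Spec_find_regular_per_game_table tables (find_regular_per_game_table tables)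

-- ===== LEMMAS AND PROOFS =====
-- Invariant of B's loop: the fallback accumulator only matters when no strong match remains.
theorem pvGoAlt_eq (tables : List (List (String × String))) :
    ∀ fb : Option (List (String × String)),
      pvGoAlt tables fb =
        match pvScanStrong tables, fb with
        | some t, _ => some t
        | none, some f => some f
        | none, none => pvScanWeak tables := by
  induction tables with
  | nil => intro fb; cases fb <;> simp [pvGoAlt, pvScanStrong, pvScanWeak]
  | cons t rest ih =>
    intro fb
    cases hs : pvStrong (pvNormHeadline t) with
    | true => simp [pvGoAlt, pvScanStrong, hs]
    | false =>
      cases fb with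
      | some f => simp [pvGoAlt, pvScanStrong, hs, ih]; cases pvScanStrong rest <;> rfl
      | none =>
        cases hw : pvWeak (pvNormHeadline t) with
        | true => simp [pvGoAlt, pvScanStrong, pvScanWeak, hs, hw, ih]; cases pvScanStrong rest <;> rfl
        | false => simp [pvGoAlt, pvScanStrong, pvScanWeak, hs, hw, ih]

-- ===== VERDICT (by name: the statement is the Claim_ definition above) =====
theorem find_regular_per_game_table_spec : Claim_equal_find_regular_per_game_table := by
  intro tables _
  unfold Spec_find_regular_per_game_table find_regular_per_game_table find_regular_per_game_table_alt
  rw [pvGoAlt_eq]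
  cases pvScanStrong tables <;> rfl
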